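-- pv_equiv track=rewrite | github.com/NahinM/CSE331 | Checkers/python/package/CheckerFuns/checkerFun_kkp_Fall25.py | question24a
-- ===== SOURCE A (Python) =====
-- def question24a(L:str) -> bool:
--     i = 0
--     zero,one = 0,0
--     while i<len(L) and L[i]=='0':
--         i+=1
--         zero+=1
--     if zero&1==0: return False
--     while i<len(L) and L[i]=='1':
--         i+=1
--         one+=1
--     if one&1==0: return False
--     if zero+one != len(L): return False
--     return True
-- ===== SOURCE B (Python) =====
-- def question24a(L: str) -> bool:
--     z = L.count('0')
--     o = L.count('1')
--     return z % 2 == 1 and o % 2 == 1 and L == '0' * z + '1' * o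
-- ===== Notes on version B (the rewrite author's own statement) =====
-- stated objective: simpler
-- what changed: Replaces the two index-driven while-loops and the consumption check by counting each of the two digit characters once and comparing L against the canonical string built from those counts, requiring both counts odd.
import Mathlib
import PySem

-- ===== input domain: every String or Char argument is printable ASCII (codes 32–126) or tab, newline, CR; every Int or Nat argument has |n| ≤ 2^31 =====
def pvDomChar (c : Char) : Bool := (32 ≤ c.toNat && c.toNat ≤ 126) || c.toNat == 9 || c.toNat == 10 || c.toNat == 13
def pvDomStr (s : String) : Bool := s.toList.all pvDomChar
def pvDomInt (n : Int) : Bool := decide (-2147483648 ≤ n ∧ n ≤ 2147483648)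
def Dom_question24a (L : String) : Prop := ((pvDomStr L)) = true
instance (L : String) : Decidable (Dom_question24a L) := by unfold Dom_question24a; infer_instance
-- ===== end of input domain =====

-- B replaces A's two index-driven while-loops by counting '0's and '1's and comparing
-- L with the canonical '0'*z + '1'*o string (objective: simpler).

-- ===== PORT A =====
-- the two while-loops of A: consume leading copies of c, returning (rest, how many consumed)
def pvTkc (c : Char) : List Char → List Char × Nat
  | [] => ([], 0)
  | x :: xs => if x == c then ((pvTkc c xs).1, (pvTkc c xs).2 + 1) else (x :: xs, 0)

def question24a (L : String) : Bool :=
  let cs := L.toList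
  let p0 := pvTkc '0' cs        -- first while loop: i advances over zeros, zero counts them
  if p0.2 % 2 == 0 then false
  else
    let p1 := pvTkc '1' p0.1    -- second while loop over ones
    if p1.2 % 2 == 0 then false
    else if p0.2 + p1.2 != cs.length then false
    else true

-- ===== PORT B =====
def question24a_alt (L : String) : Bool :=
  let cs := L.toList
  let z := cs.count '0'         -- L.count('0')
  let o := cs.count '1'         -- L.count('1')
  decide (z % 2 = 1) && decide (o % 2 = 1)
    && (cs == List.replicate z '0' ++ List.replicate o '1')   -- L == '0'*z + '1'*o

-- ===== PRECONDITION & SPEC =====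
def Spec_question24a (L : String) (out : Bool) : Prop := out = question24a_alt L
instance (L : String) (out : Bool) : Decidable (Spec_question24a L out) := by unfold Spec_question24a; infer_instance

-- ===== CLAIM (what is proved, stated in full; the proofs are below) =====
def Claim_equal_question24a : Prop := ∀ (L : String), Dom_question24a L → Spec_question24a L (question24a L)

-- ===== LEMMAS AND PROOFS =====

theorem pvTkc_eq (c : Char) (xs : List Char) :
    pvTkc c xs = (xs.dropWhile (· == c), (xs.takeWhile (· == c)).length) := by
  induction xs with
  | nil => simp [pvTkc]
  | cons x xs ih =>
    by_cases h : x == c <;> simp [pvTkc, h, ih, List.dropWhile, List.takeWhile]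

theorem question24a_list_main (cs : List Char) :
    ((cs.takeWhile (· == '0')).length % 2 = 1
      ∧ ((cs.dropWhile (· == '0')).takeWhile (· == '1')).length % 2 = 1
      ∧ (cs.takeWhile (· == '0')).length
          + ((cs.dropWhile (· == '0')).takeWhile (· == '1')).length = cs.length)
    ↔ (cs.count '0' % 2 = 1 ∧ cs.count '1' % 2 = 1
      ∧ cs = List.replicate (cs.count '0') '0' ++ List.replicate (cs.count '1') '1') := by
  constructor
  · rintro ⟨hz, ho, hlen⟩
    set z := (cs.takeWhile (· == '0')).length with hzdef
    set r1 := cs.dropWhile (· == '0') with hr1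
    set o := (r1.takeWhile (· == '1')).length with hodef
    have htw0 : cs.takeWhile (· == '0') = List.replicate z '0' := by
      apply List.eq_replicate_of_mem
      intro b hb
      have := List.mem_takeWhile_imp hb
      simpa using this
    have htw1 : r1.takeWhile (· == '1') = List.replicate o '1' := by
      apply List.eq_replicate_of_mem
      intro b hb
      have := List.mem_takeWhile_imp hb
      simpa using this
    have hsplit : cs = List.replicate z '0' ++ r1 := by
      rw [← htw0, hr1, List.takeWhile_append_dropWhile]
    have hsplit1 : r1 = List.replicate o '1' ++ r1.dropWhile (· == '1') := by
      rw [← htw1, List.takeWhile_append_dropWhile]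
    have hlen2 : cs.length = z + r1.length := by
      rw [hsplit]; simp
    have hlen3 : r1.length = o + (r1.dropWhile (· == '1')).length := by
      conv_lhs => rw [hsplit1]
      simp
    have hnil : r1.dropWhile (· == '1') = [] := by
      have : (r1.dropWhile (· == '1')).length = 0 := by omega
      exact List.eq_nil_of_length_eq_zero this
    have hcs : cs = List.replicate z '0' ++ List.replicate o '1' := by
      rw [hsplit]
      conv_lhs => rw [hsplit1]
      rw [hnil, List.append_nil]
    have hc0 : cs.count '0' = z := by
      rw [hcs]; simp [List.count_append, List.count_replicate]
    have hc1 : cs.count '1' = o := by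
      rw [hcs]; simp [List.count_append, List.count_replicate]
    refine ⟨by rw [hc0]; exact hz, by rw [hc1]; exact ho, ?_⟩
    rw [hc0, hc1]; exact hcs
  · rintro ⟨hz, ho, hcs⟩
    set z := cs.count '0' with hzdef
    set o := cs.count '1' with hodef
    have hopos : 0 < o := by omega
    have htw0 : cs.takeWhile (· == '0') = List.replicate z '0' := by
      obtain ⟨k, hk⟩ := Nat.exists_eq_succ_of_ne_zero (Nat.pos_iff_ne_zero.mp hopos)
      rw [hcs, hk, List.replicate_succ, List.takeWhile_append]
      simp
    have hdw0 : cs.dropWhile (· == '0') = List.replicate o '1' := by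
      obtain ⟨k, hk⟩ := Nat.exists_eq_succ_of_ne_zero (Nat.pos_iff_ne_zero.mp hopos)
      rw [hcs, hk, List.replicate_succ, List.dropWhile_append]
      simp
    have htw1 : (cs.dropWhile (· == '0')).takeWhile (· == '1') = List.replicate o '1' := by
      rw [hdw0, List.takeWhile_replicate]; simp
    have hlen : cs.length = z + o := by rw [hcs]; simp
    refine ⟨?_, ?_, ?_⟩
    · rw [htw0, List.length_replicate]; exact hz
    · rw [htw1, List.length_replicate]; exact ho
    · rw [htw0, htw1, List.length_replicate, List.length_replicate]; omega

-- ===== VERDICT (by name: the statement is the Claim_ definition above) =====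
theorem pv_ite3 (a b c : Prop) [Decidable a] [Decidable b] [Decidable c] :
    ((if a then false else if b then false else if c then false else true) = true)
      ↔ (¬a ∧ ¬b ∧ ¬c) := by
  split_ifs <;> simp [*]

theorem question24a_spec : Claim_equal_question24a := by
  intro L _
  unfold Spec_question24a
  rw [Bool.eq_iff_iff]
  have hA : question24a L = true
      ↔ ((L.toList.takeWhile (· == '0')).length % 2 = 1
        ∧ ((L.toList.dropWhile (· == '0')).takeWhile (· == '1')).length % 2 = 1
        ∧ (L.toList.takeWhile (· == '0')).length
            + ((L.toList.dropWhile (· == '0')).takeWhile (· == '1')).length = L.toList.length) := by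
    simp only [question24a, pvTkc_eq]
    rw [pv_ite3]
    simp
  have hB : question24a_alt L = true
      ↔ (L.toList.count '0' % 2 = 1 ∧ L.toList.count '1' % 2 = 1
        ∧ L.toList = List.replicate (L.toList.count '0') '0'
            ++ List.replicate (L.toList.count '1') '1') := by
    simp [question24a_alt, and_assoc]
  rw [hA, hB]
  exact question24a_list_main L.toList
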